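-- pv_equiv track=rewrite | github.com/jmccullough4/webui | wh-2.1.6/wh/utils/license_decorators.py | sanitize_device_id
-- ===== SOURCE A (Python) =====
-- def sanitize_device_id(device_id):
--     """Sanitize device ID to prevent injection attacks"""
--     if not device_id or not isinstance(device_id, str):
--         return None
--
--     # Check for reasonable length (device IDs are typically 32-64 chars)
--     if len(device_id) < 16 or len(device_id) > 128:
--         return None
--
--     # Check for valid hex characters only
--     if not all(c in '0123456789abcdefABCDEF' for c in device_id):
--         return None
--
--     return device_id
-- ===== SOURCE B (Python) =====
-- import re
--
-- _DEVICE_ID_RE = re.compile(r'[0-9a-fA-F]{16,128}\Z')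
--
-- def sanitize_device_id(device_id):
--     """Sanitize device ID to prevent injection attacks"""
--     if not device_id or not isinstance(device_id, str):
--         return None
--     return device_id if _DEVICE_ID_RE.fullmatch(device_id) else None
-- ===== Notes on version B (the rewrite author's own statement) =====
-- stated objective: idiomatic
-- what changed: Replaced the explicit per-character membership scan plus two-sided length comparisons with a single precompiled regex fullmatch whose quantifier {16,128} encodes the length bounds.
import Mathlib
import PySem

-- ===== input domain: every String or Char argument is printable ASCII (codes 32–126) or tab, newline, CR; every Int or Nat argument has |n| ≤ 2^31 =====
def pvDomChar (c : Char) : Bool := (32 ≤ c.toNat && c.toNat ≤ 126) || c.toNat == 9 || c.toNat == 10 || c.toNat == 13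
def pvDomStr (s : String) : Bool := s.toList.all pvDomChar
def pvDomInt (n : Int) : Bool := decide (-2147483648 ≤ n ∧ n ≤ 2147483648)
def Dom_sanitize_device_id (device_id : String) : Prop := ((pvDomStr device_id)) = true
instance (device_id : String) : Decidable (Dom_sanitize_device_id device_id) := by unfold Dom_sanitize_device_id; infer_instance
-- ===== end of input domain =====

-- B replaces A's explicit per-character membership scan and two length comparisons with a
-- single regex fullmatch r'[0-9a-fA-F]{16,128}' (objective: idiomatic); return values only.

-- ===== PORT A =====
-- 'c in "0123456789abcdefABCDEF"' : membership of a char in the literal string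
def pvHexLiteral : List Char := "0123456789abcdefABCDEF".toList

def sanitize_device_id (device_id : String) : Option String :=
  -- if not device_id: return None  (a str is falsy iff empty)
  if device_id.toList = [] then none
  else if device_id.toList.length < 16 ∨ 128 < device_id.toList.length then none
  else if ¬ (device_id.toList.all (fun c => pvHexLiteral.contains c)) then none
  else some device_id

-- ===== PORT B =====
-- the regex character class [0-9a-fA-F], ported exactly as the three ranges it denotes
def pvHexClass (c : Char) : Bool :=
  ('0' ≤ c && c ≤ '9') || ('a' ≤ c && c ≤ 'f') || ('A' ≤ c && c ≤ 'F')

-- re.fullmatch(r'[0-9a-fA-F]{16,128}', s): every char in the class, length within the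
-- quantifier's inclusive bounds — this is the exact semantics of that regex on any string
def pvFullmatchHex16_128 (s : String) : Bool :=
  16 ≤ s.toList.length && s.toList.length ≤ 128 && s.toList.all pvHexClass

def sanitize_device_id_alt (device_id : String) : Option String :=
  if device_id.toList = [] then none
  else if pvFullmatchHex16_128 device_id then some device_id else none

-- ===== PRECONDITION & SPEC =====
def Spec_sanitize_device_id (device_id : String) (out : Option String) : Prop := out = sanitize_device_id_alt device_id
instance (device_id : String) (out : Option String) : Decidable (Spec_sanitize_device_id device_id out) := by unfold Spec_sanitize_device_id; infer_instance

-- ===== CLAIM (what is proved, stated in full; the proofs are below) =====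
def Claim_equal_sanitize_device_id : Prop := ∀ (device_id : String), Dom_sanitize_device_id device_id → Spec_sanitize_device_id device_id (sanitize_device_id device_id)

-- ===== LEMMAS AND PROOFS =====

-- membership in A's literal hex string coincides with B's character class, for every Char
theorem hexLiteral_eq_class (c : Char) : pvHexLiteral.contains c = pvHexClass c := by
  have hl : pvHexLiteral = ['0','1','2','3','4','5','6','7','8','9','a','b','c','d','e','f','A','B','C','D','E','F'] := by decide
  rw [hl, Bool.eq_iff_iff]
  simp only [List.contains_iff_mem, List.mem_cons, List.not_mem_nil, or_false, pvHexClass,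
    Bool.or_eq_true, Bool.and_eq_true, decide_eq_true_eq, Char.le_def,
    UInt32.le_iff_toNat_le, Char.ext_iff, ← UInt32.toNat_inj]
  simp only [show ('0':Char).val.toNat = 48 from rfl, show ('1':Char).val.toNat = 49 from rfl, show ('2':Char).val.toNat = 50 from rfl, show ('3':Char).val.toNat = 51 from rfl, show ('4':Char).val.toNat = 52 from rfl, show ('5':Char).val.toNat = 53 from rfl, show ('6':Char).val.toNat = 54 from rfl, show ('7':Char).val.toNat = 55 from rfl, show ('8':Char).val.toNat = 56 from rfl, show ('9':Char).val.toNat = 57 from rfl, show ('a':Char).val.toNat = 97 from rfl, show ('b':Char).val.toNat = 98 from rfl, show ('c':Char).val.toNat = 99 from rfl, show ('d':Char).val.toNat = 100 from rfl, show ('e':Char).val.toNat = 101 from rfl, show ('f':Char).val.toNat = 102 from rfl, show ('A':Char).val.toNat = 65 from rfl, show ('B':Char).val.toNat = 66 from rfl, show ('C':Char).val.toNat = 67 from rfl, show ('D':Char).val.toNat = 68 from rfl, show ('E':Char).val.toNat = 69 from rfl, show ('F':Char).val.toNat = 70 from rfl]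
  omega

-- ===== VERDICT (by name: the statement is the Claim_ definition above) =====
theorem sanitize_device_id_spec : Claim_equal_sanitize_device_id := by
  intro s _
  show sanitize_device_id s = sanitize_device_id_alt s
  have hall : s.toList.all (fun c => pvHexLiteral.contains c) = s.toList.all pvHexClass := by
    simp only [hexLiteral_eq_class]
  unfold sanitize_device_id sanitize_device_id_alt pvFullmatchHex16_128
  by_cases h1 : s.toList = []
  · rw [if_pos h1, if_pos h1]
  · rw [if_neg h1, if_neg h1]
    by_cases h2 : s.toList.length < 16 ∨ 128 < s.toList.length
    · rw [if_pos h2, if_neg]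
      intro hc
      simp only [Bool.and_eq_true, decide_eq_true_eq] at hc
      omega
    · rw [if_neg h2]
      by_cases h3 : s.toList.all pvHexClass = true
      · have h3' : s.toList.all (fun c => pvHexLiteral.contains c) = true := by
          rw [hall]; exact h3
        rw [if_neg (not_not_intro h3'),
          if_pos (by simp only [Bool.and_eq_true, decide_eq_true_eq]
                     exact ⟨⟨by omega, by omega⟩, h3⟩)]
      · have h3' : ¬ (s.toList.all (fun c => pvHexLiteral.contains c) = true) := by
          rw [hall]; exact h3
        rw [if_pos h3', if_neg]
        intro hc
        simp only [Bool.and_eq_true, decide_eq_true_eq] at hc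
        exact h3 hc.2
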